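-- pv_equiv track=rewrite | github.com/svshyam91/hacker_rank_solutions | Python_solutions/pilling_up.py | pilling_up
-- ===== SOURCE A (Python) =====
-- def pilling_up(d):
--     pile=[]
--     i=0
--     j=len(d)-1
--     while i < j:
--         if d[i] < d[j]:
--             pile.append(d[j])
--             j-=1
--         elif d[i] > d[j]:
--             pile.append(d[i])
--             i+=1
--         else:
--             pile.append(d[i])
--             pile.append(d[j])
--             i+=1
--             j-=1
--     if i == j:
--         pile.append(d[i])
--     for i in range(1,len(pile)):
--         if pile[i-1] < pile[i]:
--             return("No")
--     return("Yes")
-- ===== SOURCE B (Python) =====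
-- def pilling_up(d):
--     n = len(d)
--     i = 1
--     while i < n and d[i] <= d[i - 1]:
--         i += 1
--     while i < n and d[i] >= d[i - 1]:
--         i += 1
--     return "Yes" if i >= n else "No"
-- ===== Notes on version B (the rewrite author's own statement) =====
-- stated objective: simpler
-- what changed: Replaces A's two-pointer greedy that materializes a pile list and then rescans it with a single forward index walk that consumes the non-increasing prefix and then requires the remainder to be non-decreasing (valley shape); no auxiliary list and no second pass, which also gives a measured constant-factor speedup.
import Mathlib
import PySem

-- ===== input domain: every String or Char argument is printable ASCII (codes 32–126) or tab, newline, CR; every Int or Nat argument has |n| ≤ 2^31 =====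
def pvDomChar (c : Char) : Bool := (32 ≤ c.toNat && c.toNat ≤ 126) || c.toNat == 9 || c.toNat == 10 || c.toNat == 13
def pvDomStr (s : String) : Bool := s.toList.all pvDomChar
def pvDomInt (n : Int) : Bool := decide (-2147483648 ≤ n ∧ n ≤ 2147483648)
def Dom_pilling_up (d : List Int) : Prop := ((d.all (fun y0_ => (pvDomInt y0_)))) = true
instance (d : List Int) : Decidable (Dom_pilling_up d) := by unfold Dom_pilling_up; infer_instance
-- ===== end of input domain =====

-- B drops A's materialized pile and second scan: one forward walk checks the valley shape in O(1) space; return value only, neither version mutates d.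

-- ===== PORT A =====
-- the while-loop of A: state (pile, i, j); indices are always in range when read (0 ≤ i ≤ j < |d|), so Python never raises
def pillLoopA (d : List Int) (pile : List Int) (i j : Int) : List Int :=
  if _h : i < j then
    let di := ((PySem.List.pyGet? d i).getD 0)
    let dj := ((PySem.List.pyGet? d j).getD 0)
    if di < dj then pillLoopA d (pile ++ [dj]) i (j - 1)
    else if dj < di then pillLoopA d (pile ++ [di]) (i + 1) j
    else pillLoopA d (pile ++ [di, dj]) (i + 1) (j - 1)
  else if i == j then pile ++ [((PySem.List.pyGet? d i).getD 0)]
  else pile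
termination_by (j - i).toNat
decreasing_by all_goals omega

-- the final for-loop of A over adjacent pairs of pile (early return "No" on an ascent)
def pillScanA : List Int → String
  | a :: b :: rest => if a < b then "No" else pillScanA (b :: rest)
  | _ => "Yes"

def pilling_up (d : List Int) : String :=
  pillScanA (pillLoopA d [] 0 ((d.length : Int) - 1))

-- ===== PORT B =====
-- first while loop of B: consume the non-increasing prefix, return last consumed value and the rest
def pillDown (prev : Int) : List Int → Int × List Int
  | [] => (prev, [])
  | x :: xs => if x ≤ prev then pillDown x xs else (prev, x :: xs)

-- second while loop of B: is the rest non-decreasing from prev?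
def pillUp (prev : Int) : List Int → Bool
  | [] => true
  | x :: xs => if prev ≤ x then pillUp x xs else false

def pilling_up_alt (d : List Int) : String :=
  match d with
  | [] => "Yes"
  | x :: xs =>
    let (p, rest) := pillDown x xs
    if pillUp p rest then "Yes" else "No"

-- ===== PRECONDITION & SPEC =====
def Spec_pilling_up (d : List Int) (out : String) : Prop := out = pilling_up_alt d
instance (d : List Int) (out : String) : Decidable (Spec_pilling_up d out) := by unfold Spec_pilling_up; infer_instance

-- ===== CLAIM (what is proved, stated in full; the proofs are below) =====
def Claim_equal_pilling_up : Prop := ∀ (d : List Int), Dom_pilling_up d → Spec_pilling_up d (pilling_up d)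

-- ===== LEMMAS AND PROOFS =====

-- adjacent-pair predicates
def pvNonInc : List Int → Bool
  | a :: b :: r => (b ≤ a) && pvNonInc (b :: r)
  | _ => true

def pvNonDec : List Int → Bool
  | a :: b :: r => (a ≤ b) && pvNonDec (b :: r)
  | _ => true

def pvValley : List Int → Bool
  | a :: b :: r => if b ≤ a then pvValley (b :: r) else pvNonDec (b :: r)
  | _ => true

-- the pile built by A's greedy loop, as a list recursion taking from both ends
def pvPile : List Int → List Int
  | [] => []
  | [x] => [x]
  | x :: a :: rest =>
    let xs := a :: rest
    let y := xs.getLast (by simp)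
    let mid := xs.dropLast
    if x < y then y :: pvPile (x :: mid)
    else if y < x then x :: pvPile xs
    else x :: y :: pvPile mid
termination_by l => l.length
decreasing_by all_goals simp [List.length_dropLast]

theorem pvGetLast_eq (l : List Int) (h : l ≠ []) (d : Int) : l.getLast h = l.getLastD d := by
  rw [List.getLastD_eq_getLast?, List.getLast?_eq_some_getLast h]
  rfl

theorem pvLastD_concat (l : List Int) (y c : Int) : (l ++ [y]).getLastD c = y := by
  rw [← pvGetLast_eq _ (by simp) c]
  simp

theorem pvPile_head (x : Int) (xs : List Int) :
    (pvPile (x :: xs)).head? = some (max x (xs.getLastD x)) := by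
  match xs with
  | [] => simp [pvPile]
  | a :: rest =>
    simp only [pvPile]
    generalize hg : (a :: rest).getLast (by simp) = y
    have hy : y = (a :: rest).getLastD x := by rw [← hg]; exact pvGetLast_eq _ (by simp) x
    split_ifs with h1 h2 <;> simp only [List.head?_cons, Option.some_inj] <;> omega

theorem pvNonDec_head_le_last (a : Int) (l : List Int) (h : pvNonDec (a :: l) = true) :
    a ≤ l.getLastD a := by
  induction l generalizing a with
  | nil => simp
  | cons b r ih =>
    simp only [pvNonDec, Bool.and_eq_true, decide_eq_true_eq] at h
    have h2 := ih b h.2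
    rw [List.getLastD_cons]
    omega

theorem pvNonInc_last_le_head (a : Int) (l : List Int) (h : pvNonInc (a :: l) = true) :
    l.getLastD a ≤ a := by
  induction l generalizing a with
  | nil => simp
  | cons b r ih =>
    simp only [pvNonInc, Bool.and_eq_true, decide_eq_true_eq] at h
    have h2 := ih b h.2
    rw [List.getLastD_cons]
    omega

theorem pvNonDec_append (l : List Int) (a y : Int) :
    pvNonDec (a :: l ++ [y]) = ((l.getLastD a ≤ y) && pvNonDec (a :: l)) := by
  induction l generalizing a with
  | nil => simp [pvNonDec]
  | cons b r ih =>
    show pvNonDec (a :: b :: (r ++ [y])) = _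
    rw [show pvNonDec (a :: b :: (r ++ [y])) = ((a ≤ b) && pvNonDec (b :: (r ++ [y]))) from rfl]
    rw [show (b :: (r ++ [y])) = (b :: r ++ [y]) by simp, ih b, List.getLastD_cons]
    rw [show pvNonDec (a :: b :: r) = ((a ≤ b) && pvNonDec (b :: r)) from rfl]
    cases (decide (a ≤ b)) <;> cases (decide (r.getLastD b ≤ y)) <;> simp

theorem pvValley_append (l : List Int) (a y : Int) :
    pvValley (a :: l ++ [y]) =
      (if l.getLastD a ≤ y then pvValley (a :: l) else pvNonInc (a :: l)) := by
  induction l generalizing a with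
  | nil =>
    show pvValley [a, y] = _
    rw [show pvValley [a, y] = (if y ≤ a then pvValley [y] else pvNonDec [y]) from rfl]
    simp [pvValley, pvNonDec, pvNonInc]
  | cons b r ih =>
    show pvValley (a :: b :: (r ++ [y])) = _
    rw [show pvValley (a :: b :: (r ++ [y]))
        = (if b ≤ a then pvValley (b :: (r ++ [y])) else pvNonDec (b :: (r ++ [y]))) from rfl]
    rw [List.getLastD_cons]
    by_cases hba : b ≤ a
    · rw [if_pos hba, show (b :: (r ++ [y])) = (b :: r ++ [y]) by simp, ih b]
      rw [show pvValley (a :: b :: r) = pvValley (b :: r) by simp [pvValley, hba]]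
      rw [show pvNonInc (a :: b :: r) = pvNonInc (b :: r) by simp [pvNonInc, hba]]
    · rw [if_neg hba, show (b :: (r ++ [y])) = (b :: r ++ [y]) by simp, pvNonDec_append]
      rw [show pvValley (a :: b :: r) = pvNonDec (b :: r) by
        simp [pvValley, hba]]
      rw [show pvNonInc (a :: b :: r) = false by
        simp [pvNonInc]; omega]
      by_cases h2 : r.getLastD b ≤ y
      · have hd : decide (r.getLastD b ≤ y) = true := by simpa using h2
        rw [if_pos h2, hd, Bool.true_and]
      · have hd : decide (r.getLastD b ≤ y) = false := by simpa using h2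
        rw [if_neg h2, hd, Bool.false_and]

theorem pvValley_append' (l : List Int) (a y : Int) :
    pvValley (a :: (l ++ [y])) =
      (if l.getLastD a ≤ y then pvValley (a :: l) else pvNonInc (a :: l)) :=
  pvValley_append l a y

theorem pvScan_eq (l : List Int) : pillScanA l = if pvNonInc l then "Yes" else "No" := by
  induction l with
  | nil => simp [pillScanA, pvNonInc]
  | cons a t ih =>
    cases t with
    | nil => simp [pillScanA, pvNonInc]
    | cons b r =>
      simp only [pillScanA, pvNonInc, ih]
      by_cases h : a < b <;> by_cases h2 : b ≤ a <;> simp_all; omega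

theorem pvPile_concat (x y : Int) (mid : List Int) :
    pvPile (x :: (mid ++ [y])) =
      (if x < y then y :: pvPile (x :: mid)
       else if y < x then x :: pvPile (mid ++ [y])
       else x :: y :: pvPile mid) := by
  cases mid with
  | nil => simp [pvPile]
  | cons m0 ms =>
    show pvPile (x :: m0 :: (ms ++ [y])) = _
    rw [pvPile]
    have h1 : (m0 :: (ms ++ [y])).getLast (by simp) = y := by
      show ((m0 :: ms) ++ [y]).getLast _ = y
      simp
    have h2 : (m0 :: (ms ++ [y])).dropLast = m0 :: ms := by
      exact (List.dropLast_concat (l₁ := m0 :: ms) (b := y))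
    simp only [h1, h2]
    rfl

theorem pvPile_head_concat (mid : List Int) (y : Int) :
    (pvPile (mid ++ [y])).head? = some (max (mid.headD y) y) := by
  cases mid with
  | nil => simpa using pvPile_head y []
  | cons m0 ms =>
    have h := pvPile_head m0 (ms ++ [y])
    rw [pvLastD_concat] at h
    simpa using h

theorem pvValley_cons_concat (x y : Int) (mid : List Int) :
    pvValley (x :: (mid ++ [y])) =
      (if mid.headD y ≤ x then pvValley (mid ++ [y]) else pvNonDec (mid ++ [y])) := by
  cases mid <;> rfl

theorem pvNonDec_concat_le (mid : List Int) (y : Int) (h : pvNonDec (mid ++ [y]) = true) :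
    mid.headD y ≤ y := by
  cases mid with
  | nil => simp
  | cons m0 ms =>
    have h2 := pvNonDec_head_le_last m0 (ms ++ [y]) (by simpa using h)
    rw [pvLastD_concat] at h2
    simpa using h2

theorem pvPile_valley (l : List Int) : pvNonInc (pvPile l) = pvValley l := by
  induction hn : l.length using Nat.strong_induction_on generalizing l with
  | _ n ih =>
  match l with
  | [] => simp [pvPile, pvNonInc, pvValley]
  | [x] => simp [pvPile, pvNonInc, pvValley]
  | x :: a :: rest =>
    obtain ⟨mid, y, hdec⟩ : ∃ mid y, a :: rest = mid ++ [y] :=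
      ⟨(a :: rest).dropLast, (a :: rest).getLast (by simp),
        (List.dropLast_concat_getLast (by simp)).symm⟩
    have hlenn : n = rest.length + 2 := by rw [← hn]; simp
    have hlen : mid.length = rest.length := by
      have := congrArg List.length hdec; simp at this; omega
    rw [show x :: a :: rest = x :: (mid ++ [y]) from by rw [hdec]]
    rw [pvPile_concat]
    by_cases hxy : x < y
    · rw [if_pos hxy, pvValley_append']
      have ihm : pvNonInc (pvPile (x :: mid)) = pvValley (x :: mid) :=
        ih (x :: mid).length (by simp; omega) _ rfl
      have hh := pvPile_head x mid
      cases hp : pvPile (x :: mid) with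
      | nil => rw [hp] at hh; simp at hh
      | cons h0 t =>
        rw [hp] at hh ihm
        simp only [List.head?_cons, Option.some_inj] at hh
        show pvNonInc (y :: h0 :: t) = _
        rw [show pvNonInc (y :: h0 :: t) = ((h0 ≤ y) && pvNonInc (h0 :: t)) from rfl, ihm]
        by_cases hle : mid.getLastD x ≤ y
        · have hd : decide (h0 ≤ y) = true := by rw [decide_eq_true_eq]; omega
          rw [if_pos hle, hd, Bool.true_and]
        · have hni : pvNonInc (x :: mid) = false := by
            cases hni : pvNonInc (x :: mid) with
            | false => rfl
            | true => exfalso; have := pvNonInc_last_le_head x mid hni; omega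
          have hd : decide (h0 ≤ y) = false := by rw [decide_eq_false_iff_not]; omega
          rw [if_neg hle, hni, hd, Bool.false_and]
    · by_cases hyx : y < x
      · rw [if_neg hxy, if_pos hyx, pvValley_cons_concat]
        have ihm : pvNonInc (pvPile (mid ++ [y])) = pvValley (mid ++ [y]) :=
          ih (mid ++ [y]).length (by simp; omega) _ rfl
        have hh := pvPile_head_concat mid y
        cases hp : pvPile (mid ++ [y]) with
        | nil => rw [hp] at hh; simp at hh
        | cons h0 t =>
          rw [hp] at hh ihm
          simp only [List.head?_cons, Option.some_inj] at hh
          show pvNonInc (x :: h0 :: t) = _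
          rw [show pvNonInc (x :: h0 :: t) = ((h0 ≤ x) && pvNonInc (h0 :: t)) from rfl, ihm]
          by_cases hhx : mid.headD y ≤ x
          · have hd : decide (h0 ≤ x) = true := by rw [decide_eq_true_eq]; omega
            rw [if_pos hhx, hd, Bool.true_and]
          · have hnd : pvNonDec (mid ++ [y]) = false := by
              cases hnd : pvNonDec (mid ++ [y]) with
              | false => rfl
              | true => exfalso; have := pvNonDec_concat_le mid y hnd; omega
            have hd : decide (h0 ≤ x) = false := by rw [decide_eq_false_iff_not]; omega
            rw [if_neg hhx, hnd, hd, Bool.false_and]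
      · have hxeq : x = y := by omega
        rw [if_neg hxy, if_neg hyx]
        cases hm : mid with
        | nil =>
          simp [pvPile, pvValley, pvNonInc, hxeq]
        | cons m0 mrest =>
          have ihm : pvNonInc (pvPile (m0 :: mrest)) = pvValley (m0 :: mrest) :=
            ih (m0 :: mrest).length (by rw [← hm]; omega) _ rfl
          have hh := pvPile_head m0 mrest
          rw [pvValley_cons_concat]
          cases hp : pvPile (m0 :: mrest) with
          | nil => rw [hp] at hh; simp at hh
          | cons h0 t =>
            rw [hp] at hh ihm
            simp only [List.head?_cons, Option.some_inj] at hh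
            show pvNonInc (x :: y :: h0 :: t) = _
            rw [show pvNonInc (x :: y :: h0 :: t)
                = ((y ≤ x) && ((h0 ≤ y) && pvNonInc (h0 :: t))) from rfl, ihm]
            have hdyx : decide (y ≤ x) = true := by rw [decide_eq_true_eq]; omega
            rw [hdyx, Bool.true_and]
            have hhd : (m0 :: mrest).headD y = m0 := rfl
            rw [hhd]
            by_cases hm0 : m0 ≤ x
            · rw [if_pos hm0, pvValley_append]
              by_cases hlast : mrest.getLastD m0 ≤ y
              · have hd : decide (h0 ≤ y) = true := by rw [decide_eq_true_eq]; omega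
                rw [if_pos hlast, hd, Bool.true_and]
              · have hni : pvNonInc (m0 :: mrest) = false := by
                  cases hni : pvNonInc (m0 :: mrest) with
                  | false => rfl
                  | true => exfalso; have := pvNonInc_last_le_head m0 mrest hni; omega
                have hd : decide (h0 ≤ y) = false := by rw [decide_eq_false_iff_not]; omega
                rw [if_neg hlast, hni, hd, Bool.false_and]
            · rw [if_neg hm0, pvNonDec_append]
              have hd : decide (h0 ≤ y) = false := by rw [decide_eq_false_iff_not]; omega
              rw [hd, Bool.false_and]
              cases hnd : pvNonDec (m0 :: mrest) with
              | false => rw [Bool.and_false]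
              | true =>
                have h2 := pvNonDec_head_le_last m0 mrest hnd
                have hd2 : decide (mrest.getLastD m0 ≤ y) = false := by rw [decide_eq_false_iff_not]; omega
                rw [hd2, Bool.false_and]

-- the segment d[i..j] A's loop works on
def pvSeg (d : List Int) (i j : Int) : List Int :=
  (d.drop i.toNat).take (j + 1 - i).toNat

theorem pvSeg_len (d : List Int) (i j : Int) (hi : 0 ≤ i) (hj : j < d.length) :
    (pvSeg d i j).length = (j + 1 - i).toNat := by
  unfold pvSeg
  simp [List.length_take, List.length_drop]
  omega

theorem pvSeg_nil (d : List Int) (i j : Int) (hij : j < i) : pvSeg d i j = [] := by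
  unfold pvSeg
  rw [show (j + 1 - i).toNat = 0 by omega]
  simp

theorem pvSeg_single (d : List Int) (i : Int) (_hi : 0 ≤ i) (hlt : i.toNat < d.length) :
    pvSeg d i i = [d[i.toNat]] := by
  unfold pvSeg
  rw [show (i + 1 - i).toNat = 1 by omega, List.take_one, List.head?_drop]
  simp [List.getElem?_eq_getElem hlt]

theorem pvSeg_cons (d : List Int) (i j : Int) (hi : 0 ≤ i) (hij : i ≤ j) (_hj : j < d.length)
    (hlt : i.toNat < d.length) :
    pvSeg d i j = d[i.toNat] :: pvSeg d (i + 1) j := by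
  unfold pvSeg
  rw [List.drop_eq_getElem_cons hlt]
  rw [show (j + 1 - i).toNat = (j + 1 - (i + 1)).toNat + 1 by omega]
  rw [List.take_succ_cons]
  rw [show (i + 1).toNat = i.toNat + 1 by omega]

theorem pvSeg_last (d : List Int) (i j : Int) (hi : 0 ≤ i) (hij : i ≤ j) (hj : j < d.length)
    (hjt : j.toNat < d.length) :
    (pvSeg d i j).getLastD 0 = d[j.toNat] := by
  have hl := pvSeg_len d i j hi hj
  have hne : (pvSeg d i j).length - 1 < (pvSeg d i j).length := by omega
  have h1 : (pvSeg d i j).getLastD 0 = (pvSeg d i j)[(pvSeg d i j).length - 1]'hne := by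
    rw [List.getLastD_eq_getLast?, List.getLast?_eq_getElem?]
    simp [List.getElem?_eq_getElem hne]
  rw [h1]
  unfold pvSeg at hl ⊢
  rw [List.getElem_take, List.getElem_drop]
  congr 1
  omega

theorem pvSeg_dropLast (d : List Int) (i j : Int) (hi : 0 ≤ i) (hij : i ≤ j) (hj : j < d.length) :
    (pvSeg d i j).dropLast = pvSeg d i (j - 1) := by
  have hl := pvSeg_len d i j hi hj
  rw [List.dropLast_eq_take, hl]
  unfold pvSeg
  rw [List.take_take]
  congr 1
  omega

theorem pillLoopA_eq_pile (d : List Int) (n : ℕ) :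
    ∀ (pile : List Int) (i j : Int), 0 ≤ i → j < d.length → (j - i).toNat = n →
      pillLoopA d pile i j = pile ++ pvPile (pvSeg d i j) := by
  induction n using Nat.strong_induction_on with
  | _ n ih =>
    intro pile i j hi hj hn
    by_cases hij : i < j
    case neg =>
      rw [pillLoopA, dif_neg hij]
      by_cases heq : i = j
      · subst heq
        have hlt : i.toNat < d.length := by omega
        rw [pvSeg_single d i hi hlt]
        simp only [beq_self_eq_true, if_pos]
        have hdi : (PySem.List.pyGet? d i).getD 0 = d[i.toNat] := by
          rw [PySem.List.pyGet?_of_nonneg d hi, List.getElem?_eq_getElem hlt]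
          rfl
        rw [hdi]
        rw [show pvPile [d[i.toNat]] = [d[i.toNat]] from by simp [pvPile]]
      · rw [show (i == j) = false by simp [heq]]
        rw [pvSeg_nil d i j (by omega)]
        simp [pvPile]
    case pos =>
      have hjlen : j.toNat < d.length := by omega
      have hilen : i.toNat < d.length := by omega
      have hdi : (PySem.List.pyGet? d i).getD 0 = d[i.toNat] := by
        rw [PySem.List.pyGet?_of_nonneg d hi, List.getElem?_eq_getElem hilen]
        rfl
      have hdj : (PySem.List.pyGet? d j).getD 0 = d[j.toNat] := by
        rw [PySem.List.pyGet?_of_nonneg d (by omega : (0:Int) ≤ j), List.getElem?_eq_getElem hjlen]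
        rfl
      rw [pillLoopA, dif_pos hij]
      rw [hdi, hdj]
      -- decompose the segment: seg i j = d[i] :: seg (i+1) j, seg (i+1) j = seg (i+1) (j-1) ++ [d[j]]
      have hcons : pvSeg d i j = d[i.toNat] :: pvSeg d (i + 1) j :=
        pvSeg_cons d i j hi (by omega) hj hilen
      have hxs_ne : pvSeg d (i + 1) j ≠ [] := by
        have := pvSeg_len d (i + 1) j (by omega) hj
        intro hc
        rw [hc] at this
        simp at this
        omega
      have hxs_last : (pvSeg d (i + 1) j).getLastD 0 = d[j.toNat] :=
        pvSeg_last d (i + 1) j (by omega) (by omega) hj hjlen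
      have hxs_drop : (pvSeg d (i + 1) j).dropLast = pvSeg d (i + 1) (j - 1) :=
        pvSeg_dropLast d (i + 1) j (by omega) (by omega) hj
      have hxsdec : pvSeg d (i + 1) j = pvSeg d (i + 1) (j - 1) ++ [d[j.toNat]] := by
        have h := List.dropLast_concat_getLast hxs_ne
        rw [hxs_drop] at h
        rw [pvGetLast_eq _ hxs_ne 0, hxs_last] at h
        exact h.symm
      have hcons1 : pvSeg d i (j - 1) = d[i.toNat] :: pvSeg d (i + 1) (j - 1) :=
        pvSeg_cons d i (j - 1) hi (by omega) (by omega) hilen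
      have hpile : pvPile (pvSeg d i j) =
          (if d[i.toNat] < d[j.toNat] then d[j.toNat] :: pvPile (d[i.toNat] :: pvSeg d (i + 1) (j - 1))
           else if d[j.toNat] < d[i.toNat] then d[i.toNat] :: pvPile (pvSeg d (i + 1) j)
           else d[i.toNat] :: d[j.toNat] :: pvPile (pvSeg d (i + 1) (j - 1))) := by
        rw [hcons, hxsdec, pvPile_concat, ← hxsdec]
      by_cases hlt : d[i.toNat] < d[j.toNat]
      · rw [if_pos hlt]
        rw [ih (j - 1 - i).toNat (by omega) (pile ++ [d[j.toNat]]) i (j - 1) hi (by omega) rfl]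
        rw [hpile, if_pos hlt, hcons1]
        simp
      · rw [if_neg hlt]
        by_cases hgt : d[j.toNat] < d[i.toNat]
        · rw [if_pos hgt]
          rw [ih (j - (i + 1)).toNat (by omega) (pile ++ [d[i.toNat]]) (i + 1) j (by omega) hj rfl]
          rw [hpile, if_neg hlt, if_pos hgt]
          simp
        · rw [if_neg hgt]
          rw [ih (j - 1 - (i + 1)).toNat (by omega) (pile ++ [d[i.toNat], d[j.toNat]]) (i + 1) (j - 1)
            (by omega) (by omega) rfl]
          rw [hpile, if_neg hlt, if_neg hgt]
          simp

theorem pvUp_eq (p : Int) (l : List Int) : pillUp p l = pvNonDec (p :: l) := by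
  induction l generalizing p with
  | nil => simp [pillUp, pvNonDec]
  | cons x xs ih =>
    show (if p ≤ x then pillUp x xs else false) = _
    rw [show pvNonDec (p :: x :: xs) = ((p ≤ x) && pvNonDec (x :: xs)) from rfl, ← ih]
    by_cases h : p ≤ x
    · simp [h]
    · simp [h]

theorem pvDown_valley (p : Int) (l : List Int) :
    (pillUp (pillDown p l).1 (pillDown p l).2) = pvValley (p :: l) := by
  induction l generalizing p with
  | nil => simp [pillDown, pillUp, pvValley]
  | cons x xs ih =>
    simp only [pillDown]
    by_cases h : x ≤ p
    · rw [if_pos h, ih, pvValley, if_pos (by simpa using h)]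
    · rw [if_neg h]
      rw [pvValley, if_neg (by simpa using h)]
      rw [show (pillUp (p, x :: xs).1 (p, x :: xs).2) = pillUp p (x :: xs) from rfl]
      rw [pvUp_eq, pvNonDec, show (decide (p ≤ x)) = true by simp; omega]
      simp

theorem pv_alt_eq (d : List Int) :
    pilling_up_alt d = if pvValley d then "Yes" else "No" := by
  match d with
  | [] => simp [pilling_up_alt, pvValley]
  | x :: xs =>
    show (let (p, rest) := pillDown x xs; if pillUp p rest then "Yes" else "No") = _
    have := pvDown_valley x xs
    cases hp : pillDown x xs with
    | mk p rest =>
      rw [hp] at this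
      simp only at this ⊢
      rw [this]

theorem pv_seg_full (d : List Int) : pvSeg d 0 ((d.length : Int) - 1) = d := by
  unfold pvSeg
  cases d with
  | nil => simp
  | cons a t =>
    simp only [Int.toNat_zero, List.drop_zero]
    rw [show ((a :: t).length : Int) - 1 + 1 - 0 = ((a :: t).length : Int) by omega]
    simp

-- ===== VERDICT (by name: the statement is the Claim_ definition above) =====
theorem pilling_up_spec : Claim_equal_pilling_up := by
  intro d _
  show pilling_up d = pilling_up_alt d
  unfold pilling_up
  rw [pillLoopA_eq_pile d (((d.length : Int) - 1) - 0).toNat [] 0 ((d.length : Int) - 1)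
    (by omega) (by omega) rfl]
  rw [List.nil_append, pv_seg_full, pvScan_eq, pvPile_valley, pv_alt_eq]
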